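-- pv_equiv track=rewrite | github.com/margoseltzer/article-scraping | src/mtx_processor.py | get_ids_idx_dicts
-- ===== SOURCE A (Python) =====
-- def get_ids_idx_dicts(obj_dict):
--     ''' return art_id to idx dict and non_art_id to idx dict
--     '''
--     art_id_idx_dict = {}
--     ft_id_idx_dict = {}
--
--     art_idx = 0
--     ft_idx = 0
--     for k, v in obj_dict.items():
--         if v['type'] == 'article':
--             art_id_idx_dict[k] = 'a' +  str(art_idx)
--             art_idx += 1
--         else:
--             ft_id_idx_dict[k] = 'f' + str(ft_idx)
--             ft_idx += 1
--     return art_id_idx_dict, ft_id_idx_dict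
-- ===== SOURCE B (Python) =====
-- def get_ids_idx_dicts(obj_dict):
--     ''' return art_id to idx dict and non_art_id to idx dict
--     '''
--     items = list(obj_dict.items())
--
--     def rank(i, is_article):
--         # a key's index is the number of same-class keys strictly before it
--         return sum(1 for _, w in items[:i] if (w['type'] == 'article') == is_article)
--
--     art_id_idx_dict = {k: 'a' + str(rank(i, True))
--                        for i, (k, v) in enumerate(items) if v['type'] == 'article'}
--     ft_id_idx_dict = {k: 'f' + str(rank(i, False))
--                       for i, (k, v) in enumerate(items) if v['type'] != 'article'}
--     return art_id_idx_dict, ft_id_idx_dict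
-- ===== Notes on version B (the rewrite author's own statement) =====
-- stated objective: alternative
-- what changed: Replaces A's sequential loop with running counters by a stateless rank computation: each key's label index is computed directly as the count of same-class predecessors (a per-key scan of the prefix), with the two dicts built by independent comprehensions; trades O(n) for O(n^2) to remove all sequential state.
import Mathlib
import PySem

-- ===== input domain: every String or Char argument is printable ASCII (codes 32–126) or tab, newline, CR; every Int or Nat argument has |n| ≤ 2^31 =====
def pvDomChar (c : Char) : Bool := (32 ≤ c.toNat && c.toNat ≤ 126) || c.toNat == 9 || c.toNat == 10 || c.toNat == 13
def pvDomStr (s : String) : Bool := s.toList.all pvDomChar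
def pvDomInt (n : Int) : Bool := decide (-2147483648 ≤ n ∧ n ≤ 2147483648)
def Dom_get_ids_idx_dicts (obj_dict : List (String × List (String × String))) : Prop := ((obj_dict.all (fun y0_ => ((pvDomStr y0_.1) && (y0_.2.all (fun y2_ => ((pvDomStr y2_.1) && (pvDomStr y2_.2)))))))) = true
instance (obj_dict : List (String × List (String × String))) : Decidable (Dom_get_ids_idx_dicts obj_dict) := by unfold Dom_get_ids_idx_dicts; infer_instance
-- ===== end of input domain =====

-- B replaces A's sequential loop with running counters by a stateless rank computation:
-- each key's index is the count of same-class predecessors, dicts built by independent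
-- comprehensions (alternative structure; quadratic, not faster).


-- ===== PORT A =====
-- fused loop: state = (art dict, ft dict, art_idx, ft_idx); v['type'] lookup is
-- (Dict.mk v).getD "type" "" — exact under Pre_, which guarantees the key is present
def get_ids_idx_dicts (obj_dict : List (String × List (String × String))) : (List (String × String)) × (List (String × String)) :=
  let st := obj_dict.foldl
    (fun (st : PySem.Dict String String × PySem.Dict String String × Int × Int) p =>
      if (PySem.Dict.mk p.2).getD "type" "" = "article" then
        (st.1.insert p.1 ("a" ++ PySem.Int.toStr st.2.2.1), st.2.1, st.2.2.1 + 1, st.2.2.2)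
      else
        (st.1, st.2.1.insert p.1 ("f" ++ PySem.Int.toStr st.2.2.2), st.2.2.1, st.2.2.2 + 1))
    (PySem.Dict.empty, PySem.Dict.empty, 0, 0)
  (st.1.items, st.2.1.items)

-- ===== PORT B =====
-- stateless ranks: rank i cls = count of same-class entries in items[:i]; each dict is one
-- comprehension over enumerate(items) (exact under Pre_, whose key-uniqueness makes the
-- comprehension's dict a plain association list)
def get_ids_idx_dicts_alt (obj_dict : List (String × List (String × String))) : (List (String × String)) × (List (String × String)) :=
  let items := obj_dict
  let rank := fun (i : Int) (isArticle : Bool) =>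
    (((PySem.List.slice items none (some i)).countP
        (fun p => (((PySem.Dict.mk p.2).getD "type" "" == "article") == isArticle)) : Int))
  (((PySem.List.enumerate items 0).filter (fun q => (PySem.Dict.mk q.2.2).getD "type" "" == "article")).map
      (fun q => (q.2.1, "a" ++ PySem.Int.toStr (rank q.1 true))),
   ((PySem.List.enumerate items 0).filter (fun q => !((PySem.Dict.mk q.2.2).getD "type" "" == "article"))).map
      (fun q => (q.2.1, "f" ++ PySem.Int.toStr (rank q.1 false))))

-- ===== PRECONDITION & SPEC =====
-- Pre_ excludes (i) association lists with duplicate top-level or inner keys, which no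
-- Python dict input can represent, and (ii) inner dicts without a 'type' key, on which A
-- raises KeyError (B raises KeyError there too).
def Pre_get_ids_idx_dicts (obj_dict : List (String × List (String × String))) : Prop :=
  (obj_dict.map (·.1)).Nodup ∧
  ∀ p ∈ obj_dict, (p.2.map (·.1)).Nodup ∧ "type" ∈ p.2.map (·.1)
instance (obj_dict : List (String × List (String × String))) : Decidable (Pre_get_ids_idx_dicts obj_dict) := by unfold Pre_get_ids_idx_dicts; infer_instance
def pvWitness_get_ids_idx_dicts : (List (String × List (String × String))) :=
  [("x", [("type", "article")]), ("y", [("type", "blog")])]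
def Spec_get_ids_idx_dicts (obj_dict : List (String × List (String × String))) (out : (List (String × String)) × (List (String × String))) : Prop := out = get_ids_idx_dicts_alt obj_dict
instance (obj_dict : List (String × List (String × String))) (out : (List (String × String)) × (List (String × String))) : Decidable (Spec_get_ids_idx_dicts obj_dict out) := by unfold Spec_get_ids_idx_dicts; infer_instance

-- ===== CLAIM (what is proved, stated in full; the proofs are below) =====
def Claim_equal_get_ids_idx_dicts : Prop := ∀ (obj_dict : List (String × List (String × String))), Dom_get_ids_idx_dicts obj_dict → Pre_get_ids_idx_dicts obj_dict → Spec_get_ids_idx_dicts obj_dict (get_ids_idx_dicts obj_dict)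

-- ===== LEMMAS AND PROOFS =====

-- keys of the 'article' entries (resp. the others), in order
def pvArtKeys (l : List (String × List (String × String))) : List String :=
  (l.filter (fun p => (PySem.Dict.mk p.2).getD "type" "" == "article")).map (·.1)
def pvFtKeys (l : List (String × List (String × String))) : List String :=
  (l.filter (fun p => !((PySem.Dict.mk p.2).getD "type" "" == "article"))).map (·.1)

-- A's fused loop, run from fresh dicts and arbitrary counters, appends the numbered pairs
lemma loopA_eq (l : List (String × List (String × String))) :
    ∀ (dA dF : PySem.Dict String String) (i j : Int),
      (l.map (·.1)).Nodup →
      (∀ p ∈ l, dA.contains p.1 = false ∧ dF.contains p.1 = false) →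
      l.foldl
        (fun (st : PySem.Dict String String × PySem.Dict String String × Int × Int) p =>
          if (PySem.Dict.mk p.2).getD "type" "" = "article" then
            (st.1.insert p.1 ("a" ++ PySem.Int.toStr st.2.2.1), st.2.1, st.2.2.1 + 1, st.2.2.2)
          else
            (st.1, st.2.1.insert p.1 ("f" ++ PySem.Int.toStr st.2.2.2), st.2.2.1, st.2.2.2 + 1))
        (dA, dF, i, j)
      = (PySem.Dict.mk (dA.items ++ (PySem.List.enumerate (pvArtKeys l) i).map (fun q => (q.2, "a" ++ PySem.Int.toStr q.1))),
         PySem.Dict.mk (dF.items ++ (PySem.List.enumerate (pvFtKeys l) j).map (fun q => (q.2, "f" ++ PySem.Int.toStr q.1))),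
         i + (pvArtKeys l).length, j + (pvFtKeys l).length) := by
  induction l with
  | nil =>
    intro dA dF i j _ _
    simp [pvArtKeys, pvFtKeys]
  | cons h t ih =>
    intro dA dF i j hnd hfresh
    have hndt : (t.map (·.1)).Nodup := (List.nodup_cons.mp hnd).2
    have hne : ∀ p ∈ t, p.1 ≠ h.1 := by
      intro p hp heq
      exact (List.nodup_cons.mp hnd).1
        (by simpa [heq] using List.mem_map_of_mem (f := (·.1)) hp)
    have hA : dA.contains h.1 = false := (hfresh h (List.mem_cons_self)).1
    have hF : dF.contains h.1 = false := (hfresh h (List.mem_cons_self)).2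
    by_cases hc : (PySem.Dict.mk h.2).getD "type" "" = "article"
    · have hfresh' : ∀ p ∈ t, (dA.insert h.1 ("a" ++ PySem.Int.toStr i)).contains p.1 = false ∧ dF.contains p.1 = false := by
        intro p hp
        refine ⟨?_, (hfresh p (List.mem_cons_of_mem _ hp)).2⟩
        rw [PySem.Dict.contains_insert]
        simp [hne p hp, (hfresh p (List.mem_cons_of_mem _ hp)).1]
      rw [List.foldl_cons, if_pos hc]
      rw [ih _ _ _ _ hndt hfresh']
      have hitems : (dA.insert h.1 ("a" ++ PySem.Int.toStr i)).items
          = dA.items ++ [(h.1, "a" ++ PySem.Int.toStr i)] :=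
        PySem.Dict.items_insert_of_not_contains _ _ hA
      simp [pvArtKeys, pvFtKeys, hc, hitems,
        PySem.List.enumerate_cons]
      omega
    · have hfresh' : ∀ p ∈ t, dA.contains p.1 = false ∧ (dF.insert h.1 ("f" ++ PySem.Int.toStr j)).contains p.1 = false := by
        intro p hp
        refine ⟨(hfresh p (List.mem_cons_of_mem _ hp)).1, ?_⟩
        rw [PySem.Dict.contains_insert]
        simp [hne p hp, (hfresh p (List.mem_cons_of_mem _ hp)).2]
      rw [List.foldl_cons, if_neg hc]
      rw [ih _ _ _ _ hndt hfresh']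
      have hitems : (dF.insert h.1 ("f" ++ PySem.Int.toStr j)).items
          = dF.items ++ [(h.1, "f" ++ PySem.Int.toStr j)] :=
        PySem.Dict.items_insert_of_not_contains _ _ hF
      simp [pvArtKeys, pvFtKeys, hc, hitems,
        PySem.List.enumerate_cons]
      omega

-- B's rank-by-prefix-count over enumerate equals numbering the filtered list in order
lemma rank_filter_enum {α β : Type} (P : α → Bool) (g : α → Int → β) :
    ∀ (t : List α) (b c : Int),
      (((PySem.List.enumerate t b).filter (fun q => P q.2)).map
          (fun q => g q.2 (c + ((t.take (q.1 - b).toNat).countP P : Int))))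
      = ((PySem.List.enumerate (t.filter P) c).map (fun q => g q.2 q.1)) := by
  intro t
  induction t with
  | nil => intro b c; simp [PySem.List.enumerate_nil]
  | cons x t ih =>
    intro b c
    have hcong : ∀ q ∈ (PySem.List.enumerate t (b+1)).filter (fun q => P q.2),
        g q.2 (c + (((x :: t).take (q.1 - b).toNat).countP P : Int))
        = g q.2 ((c + (if P x then 1 else 0)) + ((t.take (q.1 - (b+1)).toNat).countP P : Int)) := by
      intro q hq
      have hmem := (List.mem_filter.mp hq).1
      obtain ⟨k, hk, hqeq⟩ := (PySem.List.mem_enumerate_iff _ _ _).mp hmem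
      have h1 : (q.1 - b).toNat = k + 1 := by subst hqeq; omega
      have h2 : (q.1 - (b+1)).toNat = k := by subst hqeq; omega
      rw [h1, h2, List.take_succ_cons, List.countP_cons]
      congr 1
      by_cases hPx : P x <;> simp [hPx] <;> push_cast <;> ring
    rw [PySem.List.enumerate_cons]
    by_cases hPx : P x
    · have hf1 : List.filter (fun q => P q.2) ((b, x) :: PySem.List.enumerate t (b+1))
          = (b, x) :: List.filter (fun q => P q.2) (PySem.List.enumerate t (b+1)) := by simp [hPx]
      have hf2 : List.filter P (x :: t) = x :: List.filter P t := by simp [hPx]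
      rw [hf1, hf2, PySem.List.enumerate_cons, List.map_cons, List.map_cons]
      congr 1
      · simp
      · rw [List.map_congr_left hcong, ih (b+1) (c + (if P x then 1 else 0))]
        simp [hPx]
    · have hf1 : List.filter (fun q => P q.2) ((b, x) :: PySem.List.enumerate t (b+1))
          = List.filter (fun q => P q.2) (PySem.List.enumerate t (b+1)) := by simp [hPx]
      have hf2 : List.filter P (x :: t) = List.filter P t := by simp [hPx]
      rw [hf1, hf2, List.map_congr_left hcong, ih (b+1) (c + (if P x then 1 else 0))]
      simp [hPx]

-- enumerate commutes with map
lemma enumerate_map {α β : Type} (f : α → β) :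
    ∀ (l : List α) (s : Int),
      PySem.List.enumerate (l.map f) s = (PySem.List.enumerate l s).map (fun q => (q.1, f q.2)) := by
  intro l
  induction l with
  | nil => intro s; simp [PySem.List.enumerate_nil]
  | cons x t ih => intro s; simp [PySem.List.enumerate_cons, ih]

-- ===== VERDICT (by name: the statement is the Claim_ definition above) =====
theorem get_ids_idx_dicts_spec : Claim_equal_get_ids_idx_dicts := by
  intro l _ hpre
  unfold Spec_get_ids_idx_dicts get_ids_idx_dicts get_ids_idx_dicts_alt
  rw [loopA_eq l PySem.Dict.empty PySem.Dict.empty 0 0 hpre.1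
      (by intro p _; exact ⟨PySem.Dict.contains_empty _, PySem.Dict.contains_empty _⟩)]
  have hslice : ∀ q ∈ PySem.List.enumerate l 0,
      PySem.List.slice l none (some q.1) = l.take q.1.toNat := by
    intro q hq
    obtain ⟨k, hk, hqeq⟩ := (PySem.List.mem_enumerate_iff _ _ _).mp hq
    exact PySem.List.slice_to _ (by subst hqeq; omega)
  have hart :
      List.map
        (fun (q : Int × String × List (String × String)) =>
          (q.2.1, "a" ++ PySem.Int.toStr
            ((List.countP (fun p => (((PySem.Dict.mk p.2).getD "type" "" == "article") == true))
              (PySem.List.slice l none (some q.1))) : Int)))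
        (List.filter (fun q => (PySem.Dict.mk q.2.2).getD "type" "" == "article") (PySem.List.enumerate l 0))
    = List.map (fun q => (q.2, "a" ++ PySem.Int.toStr q.1)) (PySem.List.enumerate (pvArtKeys l) 0) := by
    refine ((List.map_congr_left ?_).trans
      (((rank_filter_enum (fun p => (PySem.Dict.mk p.2).getD "type" "" == "article")
          (fun a i => (a.1, "a" ++ PySem.Int.toStr i)) l 0 0)).trans ?_))
    · intro q hq
      rw [hslice q (List.mem_filter.mp hq).1]
      simp
    · unfold pvArtKeys
      rw [enumerate_map]
      simp
  have hft :
      List.map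
        (fun (q : Int × String × List (String × String)) =>
          (q.2.1, "f" ++ PySem.Int.toStr
            ((List.countP (fun p => (((PySem.Dict.mk p.2).getD "type" "" == "article") == false))
              (PySem.List.slice l none (some q.1))) : Int)))
        (List.filter (fun q => !((PySem.Dict.mk q.2.2).getD "type" "" == "article")) (PySem.List.enumerate l 0))
    = List.map (fun q => (q.2, "f" ++ PySem.Int.toStr q.1)) (PySem.List.enumerate (pvFtKeys l) 0) := by
    refine ((List.map_congr_left ?_).trans
      (((rank_filter_enum (fun p => !((PySem.Dict.mk p.2).getD "type" "" == "article"))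
          (fun a i => (a.1, "f" ++ PySem.Int.toStr i)) l 0 0)).trans ?_))
    · intro q hq
      rw [hslice q (List.mem_filter.mp hq).1]
      simp
    · unfold pvFtKeys
      rw [enumerate_map]
      simp
  dsimp only
  rw [hart, hft]
  simp [PySem.Dict.empty]
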